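-- pv_equiv track=rewrite | github.com/davilnam/python | Bien_va_kieu_du_lieu/PY01074.py | prime_sum_divisors
-- ===== SOURCE A (Python) =====
-- def prime_sieve(limit):
--     is_prime = [True] * (limit + 1)
--     is_prime[0] = is_prime[1] = False
--     primes = []
--
--     for num in range(2, limit + 1):
--         if is_prime[num]:
--             primes.append(num)
--             for multiple in range(num * num, limit + 1, num):
--                 is_prime[multiple] = False
--
--     return primes
--
-- def prime_sum_divisors(numbers):
--     limit = max(numbers)
--     primes = prime_sieve(limit)
--
--     prime_divisors = set()
--     for num in numbers:
--         for prime in primes: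
--             if prime * prime > num:
--                 break
--             while num % prime == 0:
--                 prime_divisors.add(prime)
--                 num //= prime
--         if num > 1:
--             prime_divisors.add(num)
--
--     prime_sum = sum(prime_divisors)
--     return prime_sum
-- ===== SOURCE B (Python) =====
-- def prime_sum_divisors(numbers):
--     divisors = set()
--     for num in numbers:
--         n = num
--         d = 2
--         while d * d <= n:
--             while n % d == 0:
--                 divisors.add(d)
--                 n //= d
--             d += 1
--         if n > 1:
--             divisors.add(n)
--     return sum(divisors)
-- ===== Notes on version B (the rewrite author's own statement) =====
-- stated objective: simpler
-- what changed: B drops the sieve of Eratosthenes and the precomputed prime list entirely: it factors each number by plain trial division over every candidate d = 2,3,4,... (composite candidates never divide once smaller primes are stripped), collecting distinct prime factors in one set.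
import Mathlib
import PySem

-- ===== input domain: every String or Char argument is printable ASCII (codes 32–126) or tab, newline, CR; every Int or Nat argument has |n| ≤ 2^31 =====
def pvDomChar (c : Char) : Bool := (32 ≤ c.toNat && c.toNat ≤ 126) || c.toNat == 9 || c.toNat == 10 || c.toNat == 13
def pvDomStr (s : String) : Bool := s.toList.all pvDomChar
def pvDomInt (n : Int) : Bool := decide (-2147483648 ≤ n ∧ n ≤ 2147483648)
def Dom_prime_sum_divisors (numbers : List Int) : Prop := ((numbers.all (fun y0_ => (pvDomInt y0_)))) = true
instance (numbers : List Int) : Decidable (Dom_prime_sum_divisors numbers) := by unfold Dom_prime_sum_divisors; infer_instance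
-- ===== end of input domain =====

-- B drops the sieve and the prime list entirely and factors each number by plain trial division
-- over every candidate d = 2, 3, 4, …; equivalence is proved on nonempty lists with maximum ≥ 1
-- (elsewhere A raises IndexError/ValueError).

-- ===== PORT A =====
-- Sieve indices written/read are the loop variables (≥ 2) and their multiples (≥ 4), all nonnegative,
-- so List.set/List.getD on .toNat are exact for Python's list indexing here
-- (the out-of-range accesses are Python raises, excluded by Pre_).

-- 'for multiple in range(num*num, limit+1, num): is_prime[multiple] = False'
def pvMarkA (limit : Int) (isp : List Bool) (num : Int) : List Bool :=
  (PySem.List.pyRange (num * num) (limit + 1) num).foldl (fun a m => a.set m.toNat false) isp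

-- one iteration of 'for num in range(2, limit+1): if is_prime[num]: …'
def pvSieveStepA (limit : Int) (st : List Int × List Bool) (num : Int) : List Int × List Bool :=
  if st.2.getD num.toNat false then (st.1 ++ [num], pvMarkA limit st.2 num) else st

def pvPrimeSieveA (limit : Int) : List Int :=
  ((PySem.List.pyRange 2 (limit + 1) 1).foldl (pvSieveStepA limit)
    ([], ((List.replicate (limit + 1).toNat true).set 0 false).set 1 false)).1

-- the 'while num % prime == 0' loop, structural on a fuel = num.toNat (sufficient: each pass with the
-- guard true strictly decreases num.toNat); the conjuncts 2 ≤ p and 0 < num only make the recursion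
-- total — Python diverges there, and they hold at every reachable call (p ≥ 2 and num ≥ p*p on entry)
def pvStripGoA (p : Int) : Nat → Int → PySem.Set Int → Int × PySem.Set Int
  | 0, num, s => (num, s)
  | fuel + 1, num, s =>
    if 2 ≤ p ∧ 0 < num ∧ PySem.Int.mod num p = 0 then
      pvStripGoA p fuel (PySem.Int.floordiv num p) (PySem.Set.add s p)
    else (num, s)

def pvStripA (p : Int) (num : Int) (s : PySem.Set Int) : Int × PySem.Set Int :=
  pvStripGoA p num.toNat num s

-- the 'for prime in primes: …' loop with its break
def pvTrialA (primes : List Int) (num : Int) (s : PySem.Set Int) : Int × PySem.Set Int :=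
  match primes with
  | [] => (num, s)
  | p :: ps =>
    if p * p > num then (num, s)
    else
      let r := pvStripA p num s
      pvTrialA ps r.1 r.2

def prime_sum_divisors (numbers : List Int) : Int :=
  let limit := (PySem.List.max? numbers (fun x => x)).getD 0
  let primes := pvPrimeSieveA limit
  let s := numbers.foldl (fun (s : PySem.Set Int) num =>
    let r := pvTrialA primes num s
    if r.1 > 1 then PySem.Set.add r.2 r.1 else r.2) PySem.Set.empty
  s.sum

-- ===== PORT B =====
-- B's inner 'while n % d == 0: divisors.add(d); n //= d' — textually the same inner while as A's,
-- same fuel/totality scheme (the guard conjuncts 2 ≤ d and 0 < n hold at every reachable call)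
def pvStripGoB (d : Int) : Nat → Int → PySem.Set Int → Int × PySem.Set Int
  | 0, n, s => (n, s)
  | fuel + 1, n, s =>
    if 2 ≤ d ∧ 0 < n ∧ PySem.Int.mod n d = 0 then
      pvStripGoB d fuel (PySem.Int.floordiv n d) (PySem.Set.add s d)
    else (n, s)

def pvStripB (d : Int) (n : Int) (s : PySem.Set Int) : Int × PySem.Set Int :=
  pvStripGoB d n.toNat n s

-- the outer 'while d * d <= n: …; d += 1' loop; fuel = original num.toNat suffices since the
-- guard forces d ≤ n and d increases by 1 each pass while n never grows
def pvDLoopB : Nat → Int → Int → PySem.Set Int → Int × PySem.Set Int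
  | 0, _, n, s => (n, s)
  | fuel + 1, d, n, s =>
    if d * d ≤ n then
      let r := pvStripB d n s
      pvDLoopB fuel (d + 1) r.1 r.2
    else (n, s)

def prime_sum_divisors_alt (numbers : List Int) : Int :=
  (numbers.foldl (fun (s : PySem.Set Int) num =>
      let r := pvDLoopB num.toNat 2 num s
      if r.1 > 1 then PySem.Set.add r.2 r.1 else r.2) PySem.Set.empty).sum

-- ===== PRECONDITION & SPEC =====
-- Pre_ excludes exactly the inputs where A raises: the empty list (max → ValueError) and
-- nonempty lists whose maximum is < 1 (sieve array of size max+1 → IndexError).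
def Pre_prime_sum_divisors (numbers : List Int) : Prop :=
  numbers ≠ [] ∧ ∃ x ∈ numbers, 1 ≤ x
instance (numbers : List Int) : Decidable (Pre_prime_sum_divisors numbers) := by
  unfold Pre_prime_sum_divisors; infer_instance
def pvWitness_prime_sum_divisors : List Int := ([12, 7, -3])

def Spec_prime_sum_divisors (numbers : List Int) (out : Int) : Prop := out = prime_sum_divisors_alt numbers
instance (numbers : List Int) (out : Int) : Decidable (Spec_prime_sum_divisors numbers out) := by unfold Spec_prime_sum_divisors; infer_instance

-- ===== CLAIM (what is proved, stated in full; the proofs are below) =====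
def Claim_equal_prime_sum_divisors : Prop := ∀ (numbers : List Int), Dom_prime_sum_divisors numbers → Pre_prime_sum_divisors numbers → Spec_prime_sum_divisors numbers (prime_sum_divisors numbers)


-- ===== LEMMAS AND PROOFS =====

theorem pv_witness_ok : Dom_prime_sum_divisors pvWitness_prime_sum_divisors ∧ Pre_prime_sum_divisors pvWitness_prime_sum_divisors := by decide

-- "q is prime" over Int, phrased exactly as the loops see it
def pvIsP (q : Int) : Prop := 2 ≤ q ∧ ∀ k : Int, 2 ≤ k → k < q → ¬ k ∣ q

-- ---- generic facts about the marking folds ----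

theorem pv_foldl_set_getD_miss (v : Bool) (ms : List Int) (a : List Bool) (i : Nat)
    (h : ∀ m ∈ ms, m.toNat ≠ i) :
    (ms.foldl (fun a m => a.set m.toNat v) a).getD i false = a.getD i false := by
  induction ms generalizing a with
  | nil => rfl
  | cons m ms ih =>
    rw [List.foldl_cons, ih _ (fun x hx => h x (by simp [hx]))]
    rw [List.getD_eq_getElem?_getD, List.getD_eq_getElem?_getD, List.getElem?_set,
      if_neg (h m (by simp))]

-- ---- the array evolution of A's sieve, separated from the prime list ----

def pvArrRun (b : Int) (ks : List Int) (a : List Bool) : List Bool :=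
  ks.foldl (fun a k => if a.getD k.toNat false then pvMarkA b a k else a) a

theorem pv_mem_stepped_range {k b m : Int} (hk : 1 ≤ k) :
    m ∈ PySem.List.pyRange (k * k) b k ↔ k * k ≤ m ∧ m < b ∧ k ∣ m - k * k :=
  PySem.List.mem_pyRange_iff_of_pos (by omega) m

theorem pv_markA_getD_miss (b : Int) (a : List Bool) (k : Int) (i : Nat)
    (h : ∀ m ∈ PySem.List.pyRange (k * k) (b + 1) k, m.toNat ≠ i) :
    (pvMarkA b a k).getD i false = a.getD i false := pv_foldl_set_getD_miss false _ a i h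

-- marks of step k only touch indices ≥ k*k, so a lower index is frozen
theorem pv_arrRun_freeze (b : Int) (ks : List Int) (a : List Bool) (i : Nat)
    (h : ∀ k ∈ ks, 1 ≤ k ∧ (i : Int) < k * k) :
    (pvArrRun b ks a).getD i false = a.getD i false := by
  induction ks generalizing a with
  | nil => rfl
  | cons k ks ih =>
    obtain ⟨hk1, hki⟩ := h k (by simp)
    have hstep : ∀ a' : List Bool, (pvMarkA b a' k).getD i false = a'.getD i false := by
      intro a'
      apply pv_markA_getD_miss
      intro m hm hmi
      obtain ⟨hlo, -, -⟩ := (pv_mem_stepped_range hk1).mp hm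
      omega
    simp only [pvArrRun, List.foldl_cons]
    split
    · rw [← pvArrRun, ih _ (fun k hk => h k (by simp [hk])), hstep]
    · rw [← pvArrRun, ih _ (fun k hk => h k (by simp [hk]))]

theorem pv_run_fst (b : Int) (ks : List Int) (ps : List Int) (a : List Bool)
    (hsort : ks.Pairwise (· < ·)) (h2 : ∀ k ∈ ks, 2 ≤ k) :
    (ks.foldl (pvSieveStepA b) (ps, a)).1 =
      ps ++ ks.filter (fun k => (pvArrRun b ks a).getD k.toNat false) := by
  induction ks generalizing ps a with
  | nil => simp
  | cons k ks ih =>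
    have hk2 : 2 ≤ k := h2 k (by simp)
    have hfreeze : ∀ a' : List Bool,
        (pvArrRun b ks a').getD k.toNat false = a'.getD k.toNat false := by
      intro a'
      apply pv_arrRun_freeze
      intro k' hk'
      have hlt : k < k' := (List.pairwise_cons.mp hsort).1 k' hk'
      have hk'2 : 2 ≤ k' := h2 k' (by simp [hk'])
      refine ⟨by omega, ?_⟩
      have : (k.toNat : Int) = k := Int.toNat_of_nonneg (by omega)
      nlinarith
    have hmarkself : (pvMarkA b a k).getD k.toNat false = a.getD k.toNat false := by
      apply pv_markA_getD_miss
      intro m hm hmi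
      obtain ⟨hlo, -, -⟩ := (pv_mem_stepped_range (by omega : (1:Int) ≤ k)).mp hm
      have hm0 : (0:Int) ≤ m := by nlinarith
      have : m = k := by omega
      nlinarith
    have htl : ks.Pairwise (· < ·) := (List.pairwise_cons.mp hsort).2
    have h2' : ∀ k' ∈ ks, 2 ≤ k' := fun k' hk' => h2 k' (by simp [hk'])
    simp only [List.foldl_cons, pvSieveStepA]
    have harr : pvArrRun b (k :: ks) a =
        pvArrRun b ks (if a.getD k.toNat false then pvMarkA b a k else a) := by
      simp only [pvArrRun, List.foldl_cons]
    by_cases hg : a.getD k.toNat false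
    · rw [if_pos hg, ih _ _ htl h2', harr, if_pos hg]
      have hkf : (pvArrRun b ks (pvMarkA b a k)).getD k.toNat false = true := by
        rw [hfreeze, hmarkself]; exact hg
      rw [List.filter_cons, if_pos (by simpa using hkf)]
      simp
    · rw [if_neg hg, ih _ _ htl h2', harr, if_neg hg]
      have hkf : (pvArrRun b ks a).getD k.toNat false = false := by
        rw [hfreeze]; exact Bool.eq_false_iff.mpr hg
      rw [List.filter_cons, if_neg (by simpa using hkf)]

theorem pv_init_getD (N : Nat) (i : Nat) (hi : i < N) :
    (((List.replicate N true).set 0 false).set 1 false).getD i false =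
      decide (2 ≤ i) := by
  rw [List.getD_eq_getElem?_getD, List.getElem?_set, List.getElem?_set, List.getElem?_replicate]
  rcases i with _ | _ | i <;> simp_all

-- the marks never touch a prime index: they hit only proper multiples m = k·t with t ≥ k ≥ 2
theorem pv_arrRun_prime (b : Int) (ks : List Int) (a : List Bool) (q : Int)
    (h2 : ∀ k ∈ ks, 2 ≤ k) (hq : pvIsP q) :
    (pvArrRun b ks a).getD q.toNat false = a.getD q.toNat false := by
  induction ks generalizing a with
  | nil => rfl
  | cons k ks ih =>
    have hk2 : 2 ≤ k := h2 k (by simp)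
    have hstep : ∀ a' : List Bool, (pvMarkA b a' k).getD q.toNat false = a'.getD q.toNat false := by
      intro a'
      apply pv_markA_getD_miss
      intro m hm hmq
      obtain ⟨hlo, -, hdvd⟩ := (pv_mem_stepped_range (by omega : (1:Int) ≤ k)).mp hm
      have hq2 : 2 ≤ q := hq.1
      have hm0 : (0:Int) ≤ m := by nlinarith
      have hmeq : m = q := by omega
      have hkq : k ∣ q := by
        have : k ∣ m - k * k + k * k := dvd_add hdvd ⟨k, rfl⟩
        simpa [hmeq] using this
      have hkk : k * k ≤ q := by rw [← hmeq]; exact hlo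
      have hklt : k < q := by nlinarith
      exact hq.2 k hk2 hklt hkq
    simp only [pvArrRun, List.foldl_cons]
    split
    · rw [← pvArrRun, ih _ (fun k hk => h2 k (by simp [hk])), hstep]
    · rw [← pvArrRun, ih _ (fun k hk => h2 k (by simp [hk]))]

-- ---- the sieve output as a filtered range, and its three facts A's loop needs ----

theorem pv_sieve_eq_filter (m : Int) :
    pvPrimeSieveA m = (PySem.List.pyRange 2 (m + 1) 1).filter
      (fun k => (pvArrRun m (PySem.List.pyRange 2 (m + 1) 1)
        (((List.replicate (m + 1).toNat true).set 0 false).set 1 false)).getD k.toNat false) := by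
  unfold pvPrimeSieveA
  rw [pv_run_fst m _ [] _ (PySem.List.pairwise_lt_pyRange_one 2 (m + 1))
    (fun k hk => ((PySem.List.mem_pyRange_one).mp hk).1)]
  rw [List.nil_append]

theorem pv_sieve_sorted (m : Int) : (pvPrimeSieveA m).Pairwise (· < ·) := by
  rw [pv_sieve_eq_filter]
  exact (PySem.List.pairwise_lt_pyRange_one 2 (m + 1)).filter _

theorem pv_sieve_ge2 (m : Int) : ∀ p ∈ pvPrimeSieveA m, 2 ≤ p := by
  intro p hp
  rw [pv_sieve_eq_filter] at hp
  exact ((PySem.List.mem_pyRange_one).mp (List.mem_of_mem_filter hp)).1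

theorem pv_sieve_complete (m q : Int) (hq : pvIsP q) (hqm : q ≤ m) : q ∈ pvPrimeSieveA m := by
  have hq2 := hq.1
  rw [pv_sieve_eq_filter]
  refine List.mem_filter.mpr ⟨(PySem.List.mem_pyRange_one).mpr ⟨by omega, by omega⟩, ?_⟩
  rw [pv_arrRun_prime m _ _ q (fun k hk => ((PySem.List.mem_pyRange_one).mp hk).1) hq]
  rw [pv_init_getD _ _ (by omega)]
  simp
  omega

-- ---- the two (identical) inner whiles, and what stripping leaves behind ----

theorem pv_stripGo_eq (p : Int) :
    ∀ (fuel : Nat) (n : Int) (s : PySem.Set Int), pvStripGoA p fuel n s = pvStripGoB p fuel n s := by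
  intro fuel
  induction fuel with
  | zero => intro n s; rfl
  | succ fuel ih =>
    intro n s
    simp only [pvStripGoA, pvStripGoB]
    split
    · exact ih _ _
    · rfl

theorem pv_div_lt {p num : Int} (hp : 2 ≤ p) (hn : 0 < num) :
    PySem.Int.floordiv num p < num ∧ 0 ≤ PySem.Int.floordiv num p := by
  rw [PySem.Int.floordiv_eq_ediv_of_pos (by omega)]
  constructor
  · rw [Int.ediv_lt_iff_lt_mul (by omega)]; nlinarith
  · exact Int.ediv_nonneg (by omega) (by omega)

theorem pv_strip_fst_dvd (d : Int) :
    ∀ (fuel : Nat) (n : Int) (s : PySem.Set Int), (pvStripGoB d fuel n s).1 ∣ n := by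
  intro fuel
  induction fuel with
  | zero => intro n s; exact dvd_refl n
  | succ fuel ih =>
    intro n s
    simp only [pvStripGoB]
    split
    · rename_i h
      obtain ⟨hd, hn, hmod⟩ := h
      have hdvd : d ∣ n := (PySem.Int.mod_eq_zero_iff_dvd n d).mp hmod
      have hq : PySem.Int.floordiv n d ∣ n := by
        rw [PySem.Int.floordiv_eq_ediv_of_pos (by omega)]
        exact ⟨d, (Int.ediv_mul_cancel hdvd).symm⟩
      exact dvd_trans (ih _ _) hq
    · exact dvd_refl n

theorem pv_strip_fst_pos (d : Int) :
    ∀ (fuel : Nat) (n : Int) (s : PySem.Set Int), 0 < n → 0 < (pvStripGoB d fuel n s).1 := by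
  intro fuel
  induction fuel with
  | zero => intro n s hn; exact hn
  | succ fuel ih =>
    intro n s hn
    simp only [pvStripGoB]
    split
    · rename_i h
      obtain ⟨hd, -, hmod⟩ := h
      have hdvd : d ∣ n := (PySem.Int.mod_eq_zero_iff_dvd n d).mp hmod
      apply ih
      rw [PySem.Int.floordiv_eq_ediv_of_pos (by omega)]
      have heq : n / d * d = n := Int.ediv_mul_cancel hdvd
      nlinarith [heq]
    · exact hn

theorem pv_strip_not_dvd (d : Int) (hd : 2 ≤ d) :
    ∀ (fuel : Nat) (n : Int) (s : PySem.Set Int), 0 < n → n.toNat ≤ fuel →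
      ¬ d ∣ (pvStripGoB d fuel n s).1 := by
  intro fuel
  induction fuel with
  | zero => intro n s hn hf; omega
  | succ fuel ih =>
    intro n s hn hf
    by_cases hmod : PySem.Int.mod n d = 0
    · simp only [pvStripGoB, if_pos (⟨hd, hn, hmod⟩ : 2 ≤ d ∧ 0 < n ∧ PySem.Int.mod n d = 0)]
      have hdvd : d ∣ n := (PySem.Int.mod_eq_zero_iff_dvd n d).mp hmod
      have hlt := pv_div_lt hd hn
      have hpos : 0 < PySem.Int.floordiv n d := by
        rw [PySem.Int.floordiv_eq_ediv_of_pos (by omega)]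
        have heq : n / d * d = n := Int.ediv_mul_cancel hdvd
        nlinarith [heq]
      exact ih _ _ hpos (by omega)
    · have hcond : ¬ (2 ≤ d ∧ 0 < n ∧ PySem.Int.mod n d = 0) := by
        rintro ⟨-, -, h⟩; exact hmod h
      simp only [pvStripGoB, if_neg hcond]
      intro hdvd
      exact hmod ((PySem.Int.mod_eq_zero_iff_dvd n d).mpr hdvd)

theorem pv_strip_noop (d : Int) (n : Int) (hnd : ¬ d ∣ n) :
    ∀ (fuel : Nat) (s : PySem.Set Int), pvStripGoB d fuel n s = (n, s) := by
  intro fuel s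
  cases fuel with
  | zero => rfl
  | succ fuel =>
    simp only [pvStripGoB]
    rw [if_neg]
    rintro ⟨-, -, hmod⟩
    exact hnd ((PySem.Int.mod_eq_zero_iff_dvd n d).mp hmod)

-- A's for-loop breaks immediately when every remaining prime is too large
theorem pv_trialA_stop (ps : List Int) (n : Int) (s : PySem.Set Int)
    (h : ∀ p ∈ ps, p * p > n) : pvTrialA ps n s = (n, s) := by
  cases ps with
  | nil => rfl
  | cons p ps => simp only [pvTrialA, if_pos (h p (by simp))]

-- ---- THE CORE: A's walk over the prime list = B's walk over all candidates ----
-- invariants: n has no divisor in [2, d); ps is sorted, all ≥ d, and contains every prime q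
-- with d ≤ q and q*q ≤ n.  Composite candidates d are no-ops on both sides.
theorem pv_loop_equiv :
    ∀ (fuel : Nat) (d n : Int) (s : PySem.Set Int) (ps : List Int),
      2 ≤ d → (n + 1 - d).toNat ≤ fuel →
      (∀ k : Int, 2 ≤ k → k < d → ¬ k ∣ n) →
      ps.Pairwise (· < ·) → (∀ p ∈ ps, d ≤ p) →
      (∀ q : Int, pvIsP q → d ≤ q → q * q ≤ n → q ∈ ps) →
      pvTrialA ps n s = pvDLoopB fuel d n s := by
  intro fuel
  induction fuel with
  | zero =>
    intro d n s ps hd2 hf hI2 hsort hge hcomp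
    have hnd : n < d := by omega
    simp only [pvDLoopB]
    apply pv_trialA_stop
    intro p hp
    have hpd := hge p hp
    nlinarith
  | succ fuel ih =>
    intro d n s ps hd2 hf hI2 hsort hge hcomp
    by_cases hg : d * d ≤ n
    · have hn : 0 < n := by nlinarith
      simp only [pvDLoopB, if_pos hg]
      by_cases hd : d ∣ n
      · -- d divides n ⇒ d is prime ⇒ d heads the prime list; both sides strip d
        have hIsP : pvIsP d := ⟨hd2, fun k hk2 hkd hkdvd => hI2 k hk2 hkd (hkdvd.trans hd)⟩
        have hmem : d ∈ ps := hcomp d hIsP le_rfl hg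
        obtain ⟨tl, rfl⟩ : ∃ tl, ps = d :: tl := by
          cases ps with
          | nil => exact absurd hmem (by simp)
          | cons p tl =>
            rcases List.mem_cons.mp hmem with heq | htl
            · exact ⟨tl, by rw [heq]⟩
            · have h1 := (List.pairwise_cons.mp hsort).1 d htl
              have h2 := hge p (by simp)
              omega
        simp only [pvTrialA, if_neg (not_lt.mpr hg)]
        have hstr : pvStripA d n s = pvStripB d n s := pv_stripGo_eq d n.toNat n s
        rw [hstr]
        set n₁ := (pvStripB d n s).1 with hn₁
        have hdvd1 : n₁ ∣ n := pv_strip_fst_dvd d n.toNat n s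
        have hpos1 : 0 < n₁ := pv_strip_fst_pos d n.toNat n s hn
        have hle1 : n₁ ≤ n := Int.le_of_dvd hn hdvd1
        have hnd1 : ¬ d ∣ n₁ := pv_strip_not_dvd d hd2 n.toNat n s hn le_rfl
        apply ih (d + 1) n₁ _ tl (by omega) (by omega)
        · intro k hk2 hkd hkdvd
          rcases lt_or_eq_of_le (by omega : k ≤ d) with hlt | heq
          · exact hI2 k hk2 hlt (hkdvd.trans hdvd1)
          · exact hnd1 (heq ▸ hkdvd)
        · exact (List.pairwise_cons.mp hsort).2
        · intro p hp
          have := (List.pairwise_cons.mp hsort).1 p hp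
          omega
        · intro q hq hdq hqq
          have hqmem : q ∈ d :: tl := hcomp q hq (by omega) (le_trans hqq hle1)
          rcases List.mem_cons.mp hqmem with heq | htl
          · omega
          · exact htl
      · -- d does not divide n: no-op on B's side; A consumes d only if it heads the list
        have hnoop : pvStripB d n s = (n, s) := pv_strip_noop d n hd n.toNat s
        rw [hnoop]
        by_cases hmem : d ∈ ps
        · obtain ⟨tl, rfl⟩ : ∃ tl, ps = d :: tl := by
            cases ps with
            | nil => exact absurd hmem (by simp)
            | cons p tl =>
              rcases List.mem_cons.mp hmem with heq | htl
              · exact ⟨tl, by rw [heq]⟩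
              · have h1 := (List.pairwise_cons.mp hsort).1 d htl
                have h2 := hge p (by simp)
                omega
          simp only [pvTrialA, if_neg (not_lt.mpr hg)]
          have hstr : pvStripA d n s = pvStripB d n s := pv_stripGo_eq d n.toNat n s
          rw [hstr, hnoop]
          apply ih (d + 1) n _ tl (by omega) (by omega)
          · intro k hk2 hkd hkdvd
            rcases lt_or_eq_of_le (by omega : k ≤ d) with hlt | heq
            · exact hI2 k hk2 hlt hkdvd
            · exact hd (heq ▸ hkdvd)
          · exact (List.pairwise_cons.mp hsort).2
          · intro p hp
            have := (List.pairwise_cons.mp hsort).1 p hp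
            omega
          · intro q hq hdq hqq
            have hqmem : q ∈ d :: tl := hcomp q hq (by omega) hqq
            rcases List.mem_cons.mp hqmem with heq | htl
            · omega
            · exact htl
        · apply ih (d + 1) n s ps (by omega) (by omega)
          · intro k hk2 hkd hkdvd
            rcases lt_or_eq_of_le (by omega : k ≤ d) with hlt | heq
            · exact hI2 k hk2 hlt hkdvd
            · exact hd (heq ▸ hkdvd)
          · exact hsort
          · intro p hp
            have h1 := hge p hp
            have h2 : p ≠ d := fun heq => hmem (heq ▸ hp)
            omega
          · intro q hq hdq hqq
            exact hcomp q hq (by omega) hqq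
    · simp only [pvDLoopB, if_neg hg]
      apply pv_trialA_stop
      intro p hp
      have hpd := hge p hp
      nlinarith

-- ===== VERDICT (by name: the statement is the Claim_ definition above) =====
theorem prime_sum_divisors_spec : Claim_equal_prime_sum_divisors := by
  intro numbers hdom hpre
  unfold Spec_prime_sum_divisors
  obtain ⟨hne, x, hxmem, hx1⟩ := hpre
  obtain ⟨m, hm⟩ : ∃ m, PySem.List.max? numbers (fun x => x) = some m := by
    cases hmq : PySem.List.max? numbers (fun x => x) with
    | none => exact absurd ((PySem.List.max?_eq_none_iff numbers _).mp hmq) hne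
    | some m => exact ⟨m, rfl⟩
  have hmax : ∀ y ∈ numbers, y ≤ m := fun y hy => PySem.List.max?_isMax hm y hy
  unfold prime_sum_divisors prime_sum_divisors_alt
  simp only [hm, Option.getD_some]
  congr 1
  apply PySem.List.foldl_congr_mem
  intro s num hnum
  have hstep : pvTrialA (pvPrimeSieveA m) num s = pvDLoopB num.toNat 2 num s := by
    apply pv_loop_equiv num.toNat 2 num s (pvPrimeSieveA m) le_rfl (by omega)
    · intro k hk2 hkd; omega
    · exact pv_sieve_sorted m
    · exact pv_sieve_ge2 m
    · intro q hq h2q hqq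
      have hq2 := hq.1
      have hqm : q ≤ m := by nlinarith [hmax num hnum]
      exact pv_sieve_complete m q hq hqm
  simp only [hstep]
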